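-- pv_equiv track=rewrite | github.com/Mejri10/codewars-solutions | 7-kyu/upper-<body>-strength/python/solution.py | alex_mistakes
-- ===== SOURCE A (Python) =====
-- def alex_mistakes(number_of_katas, time_limit):
--     time_left = time_limit - (number_of_katas)*6
--     i = total = 0
--     while True:
--         time_left -= 5 * 2**i
--         if time_left < 0:
--             break
--         else:
--             i += 1
--     return i
-- ===== SOURCE B (Python) =====
-- def alex_mistakes(number_of_katas, time_limit):
--     # Closed form: the loop subtracts 5,10,20,... i.e. after k steps 5*(2^k - 1);
--     # the answer is the largest k with 5*(2^k - 1) <= budget, computed via bit_length.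
--     budget = time_limit - 6 * number_of_katas
--     q = (budget + 5) // 5
--     if q < 1:
--         return 0
--     return q.bit_length() - 1
-- ===== Notes on version B (the rewrite author's own statement) =====
-- stated objective: faster
-- what changed: Replaced the geometric subtraction loop with an O(1) integer closed form: the answer is bit_length((budget+5)//5)-1, capped at 0.
import Mathlib
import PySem

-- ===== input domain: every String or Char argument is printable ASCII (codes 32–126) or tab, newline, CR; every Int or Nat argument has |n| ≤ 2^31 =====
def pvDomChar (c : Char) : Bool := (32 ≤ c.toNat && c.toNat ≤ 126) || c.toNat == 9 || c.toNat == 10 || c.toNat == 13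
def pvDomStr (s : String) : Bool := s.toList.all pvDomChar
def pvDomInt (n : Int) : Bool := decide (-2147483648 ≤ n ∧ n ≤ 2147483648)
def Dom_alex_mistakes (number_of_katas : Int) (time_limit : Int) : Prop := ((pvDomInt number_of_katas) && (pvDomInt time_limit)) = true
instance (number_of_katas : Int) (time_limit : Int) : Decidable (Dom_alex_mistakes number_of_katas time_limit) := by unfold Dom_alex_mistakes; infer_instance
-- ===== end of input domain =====

-- B replaces A's geometric subtraction loop by an O(1) integer bit-length closed form.


-- ===== PORT A =====
-- the 'while True' loop: subtract 5*2^i; stop (returning i) as soon as time_left goes negative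
def pvLoopA (time_left : Int) (i : Nat) : Int :=
  if time_left - 5 * 2 ^ i < 0 then (i : Int)
  else pvLoopA (time_left - 5 * 2 ^ i) (i + 1)
termination_by time_left.toNat
decreasing_by
  have hp : (0:Int) < 5 * 2 ^ i := by positivity
  omega

def alex_mistakes (number_of_katas : Int) (time_limit : Int) : Int :=
  pvLoopA (time_limit - number_of_katas * 6) 0

-- ===== PORT B =====
-- q.bit_length() is ported as PySem.Int.bitLength (Python-exact)
def alex_mistakes_alt (number_of_katas : Int) (time_limit : Int) : Int :=
  let budget := time_limit - 6 * number_of_katas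
  let q := PySem.Int.floordiv (budget + 5) 5
  if q < 1 then 0 else (PySem.Int.bitLength q : Int) - 1

-- ===== PRECONDITION & SPEC =====
def Spec_alex_mistakes (number_of_katas : Int) (time_limit : Int) (out : Int) : Prop := out = alex_mistakes_alt number_of_katas time_limit
instance (number_of_katas : Int) (time_limit : Int) (out : Int) : Decidable (Spec_alex_mistakes number_of_katas time_limit out) := by unfold Spec_alex_mistakes; infer_instance

-- ===== CLAIM (what is proved, stated in full; the proofs are below) =====
def Claim_equal_alex_mistakes : Prop := ∀ (number_of_katas : Int) (time_limit : Int), Dom_alex_mistakes number_of_katas time_limit → Spec_alex_mistakes number_of_katas time_limit (alex_mistakes number_of_katas time_limit)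

-- ===== LEMMAS AND PROOFS =====

-- shift lemma: starting the loop at exponent i+1 is the loop at exponent i on the halved budget, plus one
theorem pvLoopA_succ : ∀ (n : Nat) (t : Int) (i : Nat), t.toNat ≤ n →
    pvLoopA t (i + 1) = pvLoopA (t / 2) i + 1 := by
  intro n
  induction n with
  | zero =>
    intro t i ht
    have hc : (0:Int) < 5 * 2 ^ i := by positivity
    conv_lhs => rw [pvLoopA.eq_def]
    conv_rhs => rw [pvLoopA.eq_def]
    rw [if_pos (by rw [pow_succ]; omega), if_pos (by omega)]
    push_cast; ring
  | succ n ih =>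
    intro t i ht
    have hc : (0:Int) < 5 * 2 ^ i := by positivity
    conv_lhs => rw [pvLoopA.eq_def]
    conv_rhs => rw [pvLoopA.eq_def]
    by_cases h : t - 5 * 2 ^ (i + 1) < 0
    · rw [if_pos h, if_pos (by rw [pow_succ] at h; omega)]
      push_cast; ring
    · rw [if_neg h, if_neg (by rw [pow_succ] at h; omega)]
      have heq : t / 2 - 5 * 2 ^ i = (t - 5 * 2 ^ (i + 1)) / 2 := by
        rw [pow_succ]; omega
      rw [heq]
      exact ih (t - 5 * 2 ^ (i + 1)) (i + 1) (by rw [pow_succ] at h; omega)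

-- the closed form on budgets below 5 (the loop breaks at once)
theorem closed_small (b : Int) (hb : b < 5) :
    pvLoopA b 0 = (if (b + 5) / 5 < 1 then 0
                   else (PySem.Int.bitLength ((b + 5) / 5) : Int) - 1) := by
  rw [pvLoopA.eq_def, if_pos (by norm_num; omega)]
  by_cases h0 : b < 0
  · rw [if_pos (by omega)]
    norm_num
  · rw [if_neg (by omega)]
    have hq : (b + 5) / 5 = 1 := by omega
    rw [hq]
    decide

-- the loop from exponent 0 equals the closed form
theorem pvLoopA_closed : ∀ (n : Nat) (b : Int), b.toNat ≤ n →
    pvLoopA b 0 = (if (b + 5) / 5 < 1 then 0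
                   else (PySem.Int.bitLength ((b + 5) / 5) : Int) - 1) := by
  intro n
  induction n with
  | zero =>
    intro b hb
    exact closed_small b (by omega)
  | succ n ih =>
    intro b hb
    by_cases h : b < 5
    · exact closed_small b h
    · conv_lhs => rw [pvLoopA.eq_def]
      rw [if_neg (by norm_num; omega)]
      have hstep : pvLoopA (b - 5 * 2 ^ (0:Nat)) (0 + 1) = pvLoopA ((b - 5 * 2 ^ (0:Nat)) / 2) 0 + 1 :=
        pvLoopA_succ n (b - 5 * 2 ^ (0:Nat)) 0 (by norm_num; omega)
      rw [hstep]
      norm_num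
      norm_num at h
      rw [ih ((b - 5) / 2) (by omega)]
      have hq2 : (2:Int) ≤ (b + 5) / 5 := by omega
      have hqq : ((b - 5) / 2 + 5) / 5 = (b + 5) / 5 / 2 := by omega
      rw [hqq]
      rw [if_neg (by omega), if_neg (by omega)]
      have hbl : PySem.Int.bitLength ((b + 5) / 5) =
          PySem.Int.bitLength (PySem.Int.floordiv ((b + 5) / 5) 2) + 1 :=
        PySem.Int.bitLength_of_pos (by omega)
      rw [PySem.Int.floordiv_eq_ediv_of_pos (by norm_num)] at hbl
      rw [hbl]
      push_cast; ring

-- ===== VERDICT (by name: the statement is the Claim_ definition above) =====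
theorem alex_mistakes_spec : Claim_equal_alex_mistakes := by
  intro k t _
  unfold Spec_alex_mistakes alex_mistakes alex_mistakes_alt
  simp only [PySem.Int.floordiv_eq_ediv_of_pos (show (0:Int) < 5 by norm_num)]
  rw [pvLoopA_closed (t - k * 6).toNat (t - k * 6) le_rfl]
  have : t - k * 6 = t - 6 * k := by ring
  rw [this]
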